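-- pv_equiv track=rewrite | github.com/Deny672/dev_school_tg_bots | 02_homework/01.py | largest_radial_sum
-- ===== SOURCE A (Python) =====
-- def largest_radial_sum(arr, d):
--     step = len(arr) // d
--     sum_list = []
--     for i in range(step):
--         sublist = arr[i::step]
--         sublist_sum = sum(sublist)
--         sum_list.append(sublist_sum)
--
--     max_sum = max(sum_list)
--     return max_sum
-- ===== SOURCE B (Python) =====
-- def largest_radial_sum(arr, d):
--     step = len(arr) // d
--     sums = [0] * step
--     for j, x in enumerate(arr):
--         sums[j % step] += x
--     return max(sums)
-- ===== Notes on version B (the rewrite author's own statement) =====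
-- stated objective: alternative
-- what changed: Replaces the step separate strided slice-gather passes (one slice + sum per residue class) by a single linear pass that scatters each element into its residue bucket sums[j % step], then takes max of the buckets; it trades C-level slice/sum primitives for one explicit Python loop.
import Mathlib
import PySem

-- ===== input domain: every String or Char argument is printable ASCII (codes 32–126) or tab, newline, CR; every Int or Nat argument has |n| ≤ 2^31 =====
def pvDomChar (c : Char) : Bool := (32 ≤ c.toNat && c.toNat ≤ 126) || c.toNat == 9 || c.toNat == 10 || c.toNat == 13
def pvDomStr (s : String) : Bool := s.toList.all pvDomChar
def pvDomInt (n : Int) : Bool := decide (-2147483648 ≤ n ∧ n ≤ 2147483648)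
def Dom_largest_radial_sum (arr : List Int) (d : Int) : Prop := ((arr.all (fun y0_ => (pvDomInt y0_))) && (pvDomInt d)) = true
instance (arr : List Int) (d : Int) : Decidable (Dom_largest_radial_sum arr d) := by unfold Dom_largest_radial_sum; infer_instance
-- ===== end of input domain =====

-- B replaces A's step strided slice-gather passes by one linear scatter pass into residue buckets (objective: alternative, same cost).

-- B replaces A's per-residue strided slice-gather passes by one linear scatter pass into residue buckets.

-- ===== PORT A =====
-- step = len(arr) // d; for i in range(step): sum_list.append(sum(arr[i::step])); return max(sum_list)
def largest_radial_sum (arr : List Int) (d : Int) : Int :=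
  let step := PySem.Int.floordiv (arr.length : Int) d
  let sum_list := (PySem.List.pyRange 0 step 1).map
    (fun i => ((PySem.List.slice? arr (some i) none step).getD []).sum)
  (PySem.List.max? sum_list (fun x => x)).getD 0

-- ===== PORT B =====
-- step = len(arr) // d; sums = [0]*step; for j, x in enumerate(arr): sums[j % step] += x; return max(sums)
def largest_radial_sum_alt (arr : List Int) (d : Int) : Int :=
  let step := PySem.Int.floordiv (arr.length : Int) d
  let sums0 := List.replicate step.toNat (0 : Int)
  let sums := (PySem.List.enumerate arr 0).foldl
    (fun s p =>
      PySem.List.pySetD s (PySem.Int.mod p.1 step)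
        (PySem.List.pyGetD s (PySem.Int.mod p.1 step) 0 + p.2)) sums0
  (PySem.List.max? sums (fun x => x)).getD 0

-- ===== PRECONDITION & SPEC =====
-- A raises ZeroDivisionError when d = 0, and ValueError (max of an empty list) when len(arr) // d < 1; exactly those inputs are excluded.
def Pre_largest_radial_sum (arr : List Int) (d : Int) : Prop :=
  d ≠ 0 ∧ 1 ≤ PySem.Int.floordiv (arr.length : Int) d
instance (arr : List Int) (d : Int) : Decidable (Pre_largest_radial_sum arr d) := by
  unfold Pre_largest_radial_sum; infer_instance
def pvWitness_largest_radial_sum : List Int × Int := ([5, -2, 7, 1, 0, 3], 2)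

def Spec_largest_radial_sum (arr : List Int) (d : Int) (out : Int) : Prop := out = largest_radial_sum_alt arr d
instance (arr : List Int) (d : Int) (out : Int) : Decidable (Spec_largest_radial_sum arr d out) := by unfold Spec_largest_radial_sum; infer_instance

-- ===== CLAIM (what is proved, stated in full; the proofs are below) =====
def Claim_equal_largest_radial_sum : Prop := ∀ (arr : List Int) (d : Int), Dom_largest_radial_sum arr d → Pre_largest_radial_sum arr d → Spec_largest_radial_sum arr d (largest_radial_sum arr d)

-- ===== LEMMAS AND PROOFS =====

-- `pick st xs i` = sum of the strided slice xs[i::st] (for st > 0, 0 ≤ i), by structural recursion;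
-- both ports' bucket values are reduced to this common form.
def pick (st : Int) : List Int → Int → Int
  | [], _ => 0
  | x :: t, i => (if i = 0 then x else 0) + pick st t (if i = 0 then st - 1 else i - 1)

lemma slice_isSome (t : List Int) (j st : Int) (hst : st ≠ 0) :
    ∃ l, PySem.List.slice? t (some j) none st = some l := by
  simp [PySem.List.slice?, hst]

lemma slice_nil' (i st : Int) (hst : 0 < st) :
    PySem.List.slice? ([] : List Int) (some i) none st = some [] := by
  simp [PySem.List.slice?, PySem.List.sliceIndices, hst.ne', not_lt.mpr hst.le]

-- slice recursion on cons, for a positive step and positive start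
lemma slice_cons_pos (x : Int) (t : List Int) (i st : Int) (h0 : 0 < i) (hst : 0 < st) :
    PySem.List.slice? (x :: t) (some i) none st = PySem.List.slice? t (some (i - 1)) none st := by
  simp only [PySem.List.slice?, PySem.List.sliceIndices, if_neg hst.ne', if_neg (not_lt.mpr hst.le), if_neg (not_lt.mpr h0.le), if_neg (not_lt.mpr (by omega : (0:Int) ≤ i - 1)), if_pos hst]
  simp only [List.length_cons]
  push_cast
  set n := (t.length : Int) with hn
  have h1 : min i (n + 1) = min (i - 1) n + 1 := by omega
  have h2 : (n + 1 - (min (i - 1) n + 1) + st - 1) = (n - min (i - 1) n + st - 1) := by ring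
  rw [h1, h2]
  simp only [add_lt_add_iff_right]
  congr 1
  apply List.filterMap_congr
  intro k hk
  have hnn : 0 ≤ min (i - 1) n + st * (k : Int) := by
    have := mul_nonneg hst.le (Int.natCast_nonneg k)
    omega
  have h4 : (min (i - 1) n + 1 + st * (k : Int)).toNat = (min (i - 1) n + st * (k : Int)).toNat + 1 := by
    omega
  rw [h4, List.getElem?_cons_succ]

-- slice recursion on cons at start 0: the head is taken, the tail restarts at st - 1
lemma slice_cons_zero (x : Int) (t : List Int) (st : Int) (hst : 0 < st) :
    PySem.List.slice? (x :: t) (some 0) none st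
      = (PySem.List.slice? t (some (st - 1)) none st).map (x :: ·) := by
  simp only [PySem.List.slice?, PySem.List.sliceIndices, if_neg hst.ne', if_neg (not_lt.mpr hst.le), if_neg (not_lt.mpr (by omega : (0:Int) ≤ st - 1)), if_pos hst, Option.map_some]
  simp only [List.length_cons]
  push_cast
  set n := (t.length : Int) with hn
  have hn0 : 0 ≤ n := by positivity
  have hmin0 : min (0:Int) (n + 1) = 0 := by omega
  have hdn : 0 ≤ n / st := Int.ediv_nonneg hn0 hst.le
  have hcount : (if min (0:Int) (n + 1) < n + 1 then ((n + 1 - min (0:Int) (n+1) + st - 1) / st).toNat else 0)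
      = (if min (st - 1) n < n then ((n - min (st - 1) n + st - 1) / st).toNat else 0) + 1 := by
    rw [hmin0, if_pos (by omega : (0:Int) < n + 1)]
    have h1 : n + 1 - 0 + st - 1 = n + 1 * st := by ring
    rw [h1, Int.add_mul_ediv_right _ _ hst.ne']
    by_cases hle : st - 1 ≤ n
    · rw [min_eq_left hle]
      by_cases hlt : st - 1 < n
      · rw [if_pos hlt]
        have h2 : n - (st - 1) + st - 1 = n + 0 * st := by ring
        rw [h2, Int.add_mul_ediv_right _ _ hst.ne']
        omega
      · rw [if_neg hlt]
        have hq : n / st = 0 := Int.ediv_eq_zero_of_lt hn0 (by omega)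
        omega
    · rw [min_eq_right (by omega : n ≤ st - 1), if_neg (lt_irrefl n)]
      have hq : n / st = 0 := Int.ediv_eq_zero_of_lt hn0 (by omega)
      omega
  have hfirst : (x :: t)[(min (0:Int) (n+1) + st * ((0:Nat) : Int)).toNat]? = some x := by
    rw [hmin0]; norm_num
  rw [hcount, List.range_succ_eq_map]
  simp only [List.filterMap_cons, List.filterMap_map, hfirst]
  congr 1
  by_cases hle : st - 1 ≤ n
  · congr 1
    apply List.filterMap_congr
    intro k hk
    rw [min_eq_left hle, hmin0]
    have hk0 : 0 ≤ st * ((k:Int)) := mul_nonneg hst.le (Int.natCast_nonneg k)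
    have h4 : ((0:Int) + st * ((Nat.succ k : Nat) : Int)).toNat = (st - 1 + st * (k : Int)).toNat + 1 := by
      push_cast
      have : st * ((k:Int) + 1) = st * k + st := by ring
      omega
    rw [Function.comp_apply, h4, List.getElem?_cons_succ]
  · have hc0 : (if min (st - 1) n < n then ((n - min (st - 1) n + st - 1) / st).toNat else 0) = 0 := by
      rw [min_eq_right (by omega : n ≤ st - 1), if_neg (lt_irrefl n)]
    rw [hc0]
    simp

-- A-side: the sum of the strided slice is `pick`
lemma sum_slice_eq_pick (st : Int) (hst : 0 < st) :
    ∀ (xs : List Int) (i : Int), 0 ≤ i →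
      ((PySem.List.slice? xs (some i) none st).getD []).sum = pick st xs i := by
  intro xs
  induction xs with
  | nil => intro i hi; rw [slice_nil' i st hst]; simp [pick]
  | cons x t ih =>
    intro i hi
    by_cases h : i = 0
    · subst h
      rw [slice_cons_zero x t st hst]
      obtain ⟨l, hl⟩ := slice_isSome t (st - 1) st hst.ne'
      rw [hl]
      have := ih (st - 1) (by omega)
      rw [hl] at this
      simp only [Option.map_some, Option.getD_some, List.sum_cons, pick]
      simp only [Option.getD_some] at this
      rw [this]
      simp
    · rw [slice_cons_pos x t i st (by omega) hst]
      rw [ih (i - 1) (by omega)]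
      simp [pick, h]

lemma emod_sub_congr (k a st : Int) : (k - a) % st = (k - a % st) % st := by
  rw [Int.sub_emod, Int.sub_emod k (a % st), Int.emod_emod_of_dvd _ dvd_rfl]

lemma emod_char (c st : Int) (_hst : 0 < st) (h1 : -st ≤ c) (h2 : c < st) :
    c % st = if 0 ≤ c then c else c + st := by
  by_cases h : 0 ≤ c
  · rw [if_pos h, Int.emod_eq_of_lt h h2]
  · rw [if_neg h]
    have e : c = (c + st) + (-1) * st := by ring
    conv_lhs => rw [e]
    rw [Int.add_mul_emod_self_right]
    apply Int.emod_eq_of_lt <;> omega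

lemma emod_sub_one (X st : Int) (hst : 0 < st) :
    (X - 1) % st = if X % st = 0 then st - 1 else X % st - 1 := by
  have hd := Int.mul_ediv_add_emod X st
  have h0 : 0 ≤ X % st := Int.emod_nonneg X hst.ne'
  have h1 : X % st < st := Int.emod_lt_of_pos X hst
  have e : X - 1 = (X % st - 1) + (X / st) * st := by
    rw [mul_comm (X / st) st]; linarith
  rw [e, Int.add_mul_emod_self_right]
  by_cases h : X % st = 0
  · rw [if_pos h, h]
    have e2 : (0 : Int) - 1 = (st - 1) + (-1) * st := by ring
    rw [e2, Int.add_mul_emod_self_right]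
    exact Int.emod_eq_of_lt (by omega) (by omega)
  · rw [if_neg h]
    exact Int.emod_eq_of_lt (by omega) (by omega)

-- B-side: the scatter fold preserves the bucket count
lemma scatter_length (st : Int) :
    ∀ (l : List (Int × Int)) (s : List Int),
      (l.foldl (fun s p =>
        PySem.List.pySetD s (PySem.Int.mod p.1 st)
          (PySem.List.pyGetD s (PySem.Int.mod p.1 st) 0 + p.2)) s).length = s.length := by
  intro l
  induction l with
  | nil => intro s; rfl
  | cons p rest ih =>
    intro s
    rw [List.foldl_cons, ih, PySem.List.length_pySetD]

-- B-side invariant: bucket k of the scatter fold is its initial value plus `pick` at index (k - a) % st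
lemma scatter_getElem (st : Int) (hst : 0 < st) :
    ∀ (xs : List Int) (a : Int) (s : List Int), s.length = st.toNat →
      ∀ (k : Nat) (hk : k < s.length),
      ((PySem.List.enumerate xs a).foldl (fun s p =>
          PySem.List.pySetD s (PySem.Int.mod p.1 st)
            (PySem.List.pyGetD s (PySem.Int.mod p.1 st) 0 + p.2)) s)[k]?
        = some (s[k] + pick st xs (((k : Int) - a) % st)) := by
  intro xs
  induction xs with
  | nil =>
    intro a s hs k hk
    simp [PySem.List.enumerate, pick, List.getElem?_eq_getElem hk]
  | cons x t ih =>
    intro a s hs k hk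
    have hb0 : 0 ≤ a % st := Int.emod_nonneg a hst.ne'
    have hb1 : a % st < st := Int.emod_lt_of_pos a hst
    have hkst : (k : Int) < st := by
      have : (k : Int) < (st.toNat : Int) := by exact_mod_cast hs ▸ hk
      omega
    have hm : PySem.Int.mod a st = a % st := PySem.Int.mod_eq_emod_of_pos hst
    have hmlt : (a % st).toNat < s.length := by omega
    -- the updated buckets after distributing x
    have hset : PySem.List.pySetD s (PySem.Int.mod a st)
        (PySem.List.pyGetD s (PySem.Int.mod a st) 0 + x)
        = s.set (a % st).toNat (s[(a % st).toNat] + x) := by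
      rw [hm, PySem.List.pySetD_of_nonneg _ _ hb0]
      congr 1
      rw [PySem.List.pyGetD_eq_getElem _ _ hb0 (by omega)]
    rw [PySem.List.enumerate_cons, List.foldl_cons, hset,
      ih (a + 1) _ (by simpa using hs) k (by simpa using hk)]
    -- arithmetic: the pick index steps as pick's recursion does
    have hj : ((k : Int) - a) % st = (if a % st ≤ (k : Int) then (k : Int) - a % st else (k : Int) - a % st + st) := by
      rw [emod_sub_congr, emod_char _ st hst (by omega) (by omega)]
      split_ifs with h1 h2 h3 <;> omega
    have hc1 : (((k : Int) - a) % st = 0) ↔ ((a % st).toNat = k) := by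
      rw [hj]; split_ifs <;> omega
    have hc2 : ((k : Int) - (a + 1)) % st
        = if ((k : Int) - a) % st = 0 then st - 1 else ((k : Int) - a) % st - 1 := by
      have e : (k : Int) - (a + 1) = ((k : Int) - a) - 1 := by ring
      rw [e, emod_sub_one _ st hst]
    rw [hc2]
    congr 1
    have hpick : pick st (x :: t) (((k : Int) - a) % st)
        = (if ((k : Int) - a) % st = 0 then x else 0)
          + pick st t (if ((k : Int) - a) % st = 0 then st - 1 else ((k : Int) - a) % st - 1) := rfl
    rw [hpick]
    by_cases hz : ((k : Int) - a) % st = 0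
    · have hak : (a % st).toNat = k := hc1.mp hz
      rw [if_pos hz, if_pos hz]
      subst hak
      simp
      ring
    · have hne : (a % st).toNat ≠ k := fun h => hz (hc1.mpr h)
      rw [if_neg hz, if_neg hz]
      simp only [List.getElem_set, if_neg hne]
      ring

-- the two bucket lists coincide, hence so do their maxima
theorem ports_agree (arr : List Int) (d : Int)
    (hpre : 1 ≤ PySem.Int.floordiv (arr.length : Int) d) :
    largest_radial_sum arr d = largest_radial_sum_alt arr d := by
  unfold largest_radial_sum largest_radial_sum_alt
  set st := PySem.Int.floordiv (arr.length : Int) d with hstdef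
  have hst : 0 < st := by omega
  have key : (PySem.List.pyRange 0 st 1).map
        (fun i => ((PySem.List.slice? arr (some i) none st).getD []).sum)
      = (PySem.List.enumerate arr 0).foldl
          (fun s p => PySem.List.pySetD s (PySem.Int.mod p.1 st)
            (PySem.List.pyGetD s (PySem.Int.mod p.1 st) 0 + p.2))
          (List.replicate st.toNat (0 : Int)) := by
    apply List.ext_getElem?
    intro k
    by_cases hk : k < st.toNat
    · have hlenB : (List.replicate st.toNat (0:Int)).length = st.toNat := by simp
      rw [scatter_getElem st hst arr 0 _ hlenB k (by simpa using hk)]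
      have hA : (PySem.List.pyRange 0 st 1).map
          (fun i => ((PySem.List.slice? arr (some i) none st).getD []).sum)
          = (List.range st.toNat).map
              (fun j => ((PySem.List.slice? arr (some ((j : Nat) : Int)) none st).getD []).sum) := by
        rw [PySem.List.pyRange_one]
        rw [List.map_map]
        simp
      rw [hA, List.getElem?_map, List.getElem?_range hk]
      simp only [Option.map_some]
      rw [sum_slice_eq_pick st hst arr (k : Int) (Int.natCast_nonneg k)]
      rw [sub_zero, Int.emod_eq_of_lt (Int.natCast_nonneg k) (by omega)]
      simp
    · rw [List.getElem?_eq_none, List.getElem?_eq_none]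
      · rw [scatter_length]; simpa using not_lt.mp hk
      · simp [PySem.List.length_pyRange_one]; omega
  show (PySem.List.max? ((PySem.List.pyRange 0 st 1).map
        (fun i => ((PySem.List.slice? arr (some i) none st).getD []).sum)) (fun x => x)).getD 0
      = (PySem.List.max? ((PySem.List.enumerate arr 0).foldl
          (fun s p => PySem.List.pySetD s (PySem.Int.mod p.1 st)
            (PySem.List.pyGetD s (PySem.Int.mod p.1 st) 0 + p.2))
          (List.replicate st.toNat (0 : Int))) (fun x => x)).getD 0
  rw [key]

-- ===== VERDICT (by name: the statement is the Claim_ definition above) =====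
theorem largest_radial_sum_spec : Claim_equal_largest_radial_sum := by
  intro arr d _hdom hpre
  exact ports_agree arr d hpre.2
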